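-- pv_equiv track=rewrite | github.com/sigscape/MuTopia | mutopia/model/model_components/_kmer_encoder.py | _get_subsequence_coding
-- ===== SOURCE A (Python) =====
-- from itertools import product, combinations
-- from functools import reduce, partial
--
-- def _get_subsequence_coding(
--         alphabet_by_position,
--         subsequence_len,
--     ):
--     def get_n_outcomes(pos):
--         return reduce(
--             lambda x,y: x*y,
--             (len(alphabet_by_position[j]) for j in pos)
--         )
--
--     def scan(fn, x, carry):
--         out = []
--         for _x in x:
--             carry, _out = fn(carry, _x)
--             out.append(_out)
--         return carry, out
--
--     observation_len = len(alphabet_by_position)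
--
--     n_coefs, subsequence_coding = scan(
--         lambda carry, x : (carry + x[0], (carry, x[1])),
--         map(
--             lambda pos : (get_n_outcomes(pos), pos),
--             combinations(range(observation_len), subsequence_len)
--         ),
--         0,
--     )
--
--     return n_coefs, subsequence_coding
-- ===== SOURCE B (Python) =====
-- def _get_subsequence_coding(alphabet_by_position, subsequence_len):
--     # Recursive backtracking over positions: each level picks the next index j and
--     # recurses with the partial outcome product multiplied in, emitting every
--     # completed combination together with the running offset.  No
--     # itertools.combinations list, no per-combination reduce, no scan pass.
--     n = len(alphabet_by_position)
--     pairs = []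
--
--     def go(start, k, prod, prefix, total):
--         if k == 0:
--             pairs.append((total, prefix))
--             return total + prod
--         for j in range(start, n - k + 1):
--             total = go(j + 1, k - 1, prod * len(alphabet_by_position[j]), prefix + (j,), total)
--         return total
--
--     total = go(0, subsequence_len, 1, (), 0)
--     return total, pairs
-- ===== Notes on version B (the rewrite author's own statement) =====
-- stated objective: alternative
-- what changed: A's pipeline (itertools.combinations, a per-combination reduce product, then a closure-based stateful scan for offsets) is replaced by a recursive backtracking search over positions that prunes with the n-k+1 bound and carries the partial outcome product and running offset down the recursion, emitting each combination with its offset; no combinations list, no reduce and no scan pass exist.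
import Mathlib
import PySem

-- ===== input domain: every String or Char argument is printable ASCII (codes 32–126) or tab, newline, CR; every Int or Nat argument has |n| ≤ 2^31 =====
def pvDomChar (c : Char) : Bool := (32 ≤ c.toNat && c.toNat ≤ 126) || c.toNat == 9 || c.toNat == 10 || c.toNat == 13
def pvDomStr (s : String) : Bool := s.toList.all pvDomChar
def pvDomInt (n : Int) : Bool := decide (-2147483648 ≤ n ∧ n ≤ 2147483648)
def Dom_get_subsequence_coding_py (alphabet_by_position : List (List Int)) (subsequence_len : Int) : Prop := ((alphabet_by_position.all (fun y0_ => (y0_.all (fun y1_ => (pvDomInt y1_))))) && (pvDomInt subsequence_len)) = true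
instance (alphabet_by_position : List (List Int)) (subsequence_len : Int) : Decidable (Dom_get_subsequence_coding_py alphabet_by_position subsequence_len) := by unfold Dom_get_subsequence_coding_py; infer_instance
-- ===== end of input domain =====

-- B replaces A's itertools/reduce/scan pipeline by a recursive backtracking search over positions
-- carrying the partial product and offset down the recursion (alternative decomposition, same asymptotic cost).
-- Pre_ excludes subsequence_len ≤ 0, where Python A raises (TypeError on 0, ValueError on negatives).


-- ===== PORT A =====
-- itertools.combinations(range(n), k) in lexicographic order
def pvCombos : Nat → List Int → List (List Int)
  | 0, _ => [[]]
  | _ + 1, [] => []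
  | k + 1, x :: xs => (pvCombos k xs).map (x :: ·) ++ pvCombos (k + 1) xs

-- reduce(lambda x,y: x*y, (len(abp[j]) for j in pos)); pos is nonempty on Pre_ (j inside range, so pyGet? hits)
def pvNOutcomes (alphabet_by_position : List (List Int)) : List Int → Int
  | [] => 1  -- Python raises TypeError here; unreachable with subsequence_len ≥ 1
  | j :: rest =>
      rest.foldl (fun x j' => x * (((PySem.List.pyGet? alphabet_by_position j').getD []).length : Int))
        (((PySem.List.pyGet? alphabet_by_position j).getD []).length : Int)

def get_subsequence_coding_py (alphabet_by_position : List (List Int)) (subsequence_len : Int) : Int × (List (Int × List Int)) :=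
  let observation_len := alphabet_by_position.length
  -- map(lambda pos: (get_n_outcomes(pos), pos), combinations(range(observation_len), subsequence_len))
  let mapped := (pvCombos subsequence_len.toNat (PySem.List.pyRange 0 observation_len 1)).map
      (fun pos => (pvNOutcomes alphabet_by_position pos, pos))
  -- scan(lambda carry, x: (carry + x[0], (carry, x[1])), mapped, 0)
  mapped.foldl (fun st x => (st.1 + x.1, st.2 ++ [(st.1, x.2)])) ((0 : Int), ([] : List (Int × List Int)))

-- ===== PORT B =====
-- the recursive go(start, k, prod, prefix, total) of Source B; Python mutates `pairs` in place and
-- returns total, ported as the (total, pairs) state threaded through the recursion (structural on k,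
-- mirrored by the Nat argument; inside Pre_ subsequence_len is that Nat)
def pvGoB (abp : List (List Int)) (n : Int) : Nat → Int → Int → List Int → Int → List (Int × List Int) → Int × List (Int × List Int)
  | 0, _start, prod, pre, total, pairs => (total + prod, pairs ++ [(total, pre)])
  | m + 1, start, prod, pre, total, pairs =>
      (PySem.List.pyRange start (n - ((m : Int) + 1) + 1) 1).foldl
        (fun st j => pvGoB abp n m (j + 1)
          (prod * (((PySem.List.pyGet? abp j).getD []).length : Int)) (pre ++ [j]) st.1 st.2)
        (total, pairs)

def get_subsequence_coding_py_alt (alphabet_by_position : List (List Int)) (subsequence_len : Int) : Int × (List (Int × List Int)) :=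
  pvGoB alphabet_by_position (alphabet_by_position.length : Int) subsequence_len.toNat 0 1 [] 0 []

-- ===== PRECONDITION & SPEC =====
-- Pre_ excludes subsequence_len ≤ 0: there Python A raises (TypeError on 0, ValueError on negatives), returning nothing.
def Pre_get_subsequence_coding_py (alphabet_by_position : List (List Int)) (subsequence_len : Int) : Prop := 1 ≤ subsequence_len
instance (alphabet_by_position : List (List Int)) (subsequence_len : Int) : Decidable (Pre_get_subsequence_coding_py alphabet_by_position subsequence_len) := by unfold Pre_get_subsequence_coding_py; infer_instance
def pvWitness_get_subsequence_coding_py : List (List Int) × Int := ([[1, 2], [3], [4, 5, 6]], 2)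

def Spec_get_subsequence_coding_py (alphabet_by_position : List (List Int)) (subsequence_len : Int) (out : Int × (List (Int × List Int))) : Prop := out = get_subsequence_coding_py_alt alphabet_by_position subsequence_len
instance (alphabet_by_position : List (List Int)) (subsequence_len : Int) (out : Int × (List (Int × List Int))) : Decidable (Spec_get_subsequence_coding_py alphabet_by_position subsequence_len out) := by unfold Spec_get_subsequence_coding_py; infer_instance

-- ===== CLAIM (what is proved, stated in full; the proofs are below) =====
def Claim_equal_get_subsequence_coding_py : Prop := ∀ (alphabet_by_position : List (List Int)) (subsequence_len : Int), Dom_get_subsequence_coding_py alphabet_by_position subsequence_len → Pre_get_subsequence_coding_py alphabet_by_position subsequence_len → Spec_get_subsequence_coding_py alphabet_by_position subsequence_len (get_subsequence_coding_py alphabet_by_position subsequence_len)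
-- ===== LEMMAS AND PROOFS =====

-- product of the alphabet sizes along a combination
def pvProdLens (abp : List (List Int)) (c : List Int) : Int :=
  (c.map (fun j => (((PySem.List.pyGet? abp j).getD []).length : Int))).prod

theorem foldl_mul_eq_prod (f : Int → Int) (l : List Int) : ∀ (a : Int),
    l.foldl (fun x j => x * f j) a = a * (l.map f).prod := by
  induction l with
  | nil => simp
  | cons h t ih => intro a; simp only [List.foldl_cons, List.map_cons, List.prod_cons, ih]; ring

theorem pvNOutcomes_eq_prodLens (abp : List (List Int)) (c : List Int) :
    pvNOutcomes abp c = pvProdLens abp c := by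
  cases c with
  | nil => simp [pvNOutcomes, pvProdLens]
  | cons j rest =>
      simp only [pvNOutcomes, pvProdLens, List.map_cons, List.prod_cons,
        foldl_mul_eq_prod (fun j' => (((PySem.List.pyGet? abp j').getD []).length : Int)) rest]

theorem pvCombos_eq_nil : ∀ (l : List Int) (k : Nat), l.length < k → pvCombos k l = [] := by
  intro l
  induction l with
  | nil => intro k h; cases k with | zero => omega | succ k' => rfl
  | cons x xs ih =>
      intro k h
      cases k with
      | zero => omega
      | succ k' =>
          simp only [pvCombos, List.append_eq_nil_iff, List.map_eq_nil_iff]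
          exact ⟨ih k' (by simp at h; omega), ih (k' + 1) (by simp at h ⊢; omega)⟩

-- main invariant: pvGoB from (start, m) equals the offset-scan fold over the combinations of [start, n)
theorem pvGoB_eq_foldl (abp : List (List Int)) :
    ∀ (m : Nat) (start prod : Int) (pre : List Int) (total : Int) (pairs : List (Int × List Int)),
      pvGoB abp (abp.length : Int) m start prod pre total pairs =
        (pvCombos m (PySem.List.pyRange start (abp.length : Int) 1)).foldl
          (fun st c => (st.1 + prod * pvProdLens abp c, st.2 ++ [(st.1, pre ++ c)])) (total, pairs) := by
  intro m
  induction m with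
  | zero => intro start prod pre total pairs; simp [pvGoB, pvCombos, pvProdLens]
  | succ m' ih =>
      have key : ∀ (d : Nat) (start : Int), ((abp.length : Int) - start).toNat ≤ d →
          ∀ (prod : Int) (pre : List Int) (st : Int × List (Int × List Int)),
          (PySem.List.pyRange start ((abp.length : Int) - ((m' : Int) + 1) + 1) 1).foldl
            (fun st j => pvGoB abp (abp.length : Int) m' (j + 1)
              (prod * (((PySem.List.pyGet? abp j).getD []).length : Int)) (pre ++ [j]) st.1 st.2) st
          = (pvCombos (m' + 1) (PySem.List.pyRange start (abp.length : Int) 1)).foldl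
              (fun st c => (st.1 + prod * pvProdLens abp c, st.2 ++ [(st.1, pre ++ c)])) st := by
        intro d
        induction d with
        | zero =>
            intro start hd prod pre st
            rw [PySem.List.pyRange_one_eq_nil (by omega), PySem.List.pyRange_one_eq_nil (by omega)]
            simp [pvCombos]
        | succ d' ihd =>
            intro start hd prod pre st
            by_cases hcase : start < (abp.length : Int) - (m' : Int)
            · have e1 : PySem.List.pyRange start ((abp.length : Int) - ((m' : Int) + 1) + 1) 1
                  = start :: PySem.List.pyRange (start + 1) ((abp.length : Int) - ((m' : Int) + 1) + 1) 1 :=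
                PySem.List.pyRange_one_cons (by omega)
              have e2 : PySem.List.pyRange start ((abp.length : Int)) 1
                  = start :: PySem.List.pyRange (start + 1) ((abp.length : Int)) 1 :=
                PySem.List.pyRange_one_cons (by omega)
              rw [e1, e2]
              have ec : pvCombos (m' + 1) (start :: PySem.List.pyRange (start + 1) ((abp.length : Int)) 1)
                  = ((pvCombos m' (PySem.List.pyRange (start + 1) ((abp.length : Int)) 1)).map (start :: ·))
                    ++ pvCombos (m' + 1) (PySem.List.pyRange (start + 1) ((abp.length : Int)) 1) := rfl
              rw [ec]
              simp only [List.foldl_cons, List.foldl_append, List.foldl_map]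
              rw [ih (start + 1)
                    (prod * (((PySem.List.pyGet? abp start).getD []).length : Int)) (pre ++ [start])
                    st.1 st.2,
                  ihd (start + 1) (by omega) prod pre]
              congr 1
              apply List.foldl_ext
              intro st' c _
              simp only [pvProdLens, List.map_cons, List.prod_cons, List.append_assoc,
                List.singleton_append, Prod.mk.injEq]
              exact ⟨by ring, trivial⟩
            · rw [PySem.List.pyRange_one_eq_nil (by omega),
                  pvCombos_eq_nil _ (m' + 1) (by rw [PySem.List.length_pyRange_one]; omega)]
              simp
      intro start prod pre total pairs
      rw [pvGoB]
      exact key _ start le_rfl prod pre (total, pairs)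

-- ===== VERDICT (by name: the statement is the Claim_ definition above) =====
theorem get_subsequence_coding_py_spec : Claim_equal_get_subsequence_coding_py := by
  intro abp sl _ hpre
  unfold Spec_get_subsequence_coding_py get_subsequence_coding_py get_subsequence_coding_py_alt
  have hsl : ((sl.toNat : Nat) : Int) = sl := Int.toNat_of_nonneg (by exact le_trans (by norm_num) hpre)
  rw [pvGoB_eq_foldl abp sl.toNat 0 1 [] 0 []]
  simp only [List.foldl_map]
  apply List.foldl_ext
  intro st c _
  simp [pvNOutcomes_eq_prodLens]
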